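-- pv_equiv track=rewrite | github.com/jerovidela/IA | TP02/Ejercicio_5.py | dfs
-- ===== SOURCE A (Python) =====
-- graph = {
--     "A": {"B": 1, "C": 1},
--     "B": {"A": 1, "D": 1},
--     "C": {"A": 1, "K": 1},
--     "D": {"B": 1, "M": 1},
--     "E": {"N": 1},
--     "G": {"I": 1, "P": 1},
--     "I": {"G": 1, "Q": 1, "W": 1},
--     "W": {"I": 30, "K": 30},  # pesos altos simulan que este camino no es ideal
--     "K": {"W": 1, "M": 1, "T": 1, "C": 1},
--     "M": {"K": 1, "N": 1, "F": 1, "D": 1},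
--     "N": {"M": 1, "E": 1},
--     "P": {"G": 1, "Q": 1},
--     "Q": {"I": 1, "P": 1, "R": 1},
--     "R": {"Q": 1, "T": 1},
--     "T": {"K": 1, "R": 1},
--     "F": {"M": 1},
-- }
--
-- def dfs(start, goal):
--     """
--     Algoritmo DFS clásico (con pila).
--     Explora caminos hasta encontrar la meta.
--     No garantiza ser el mas optimo.
--     """
--     stack = [(start, [start], 0)]  # (nodo actual, camino recorrido, costo acumulado)
--     visited = set()
--
--     while stack:
--         node, path, cost = stack.pop()
--         if node == goal:
--             return path, cost
--         if node in visited: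
--             continue
--         visited.add(node)
--
--         # Se recorre en orden alfabético invertido para mantener consistencia en el recorrido
--         for neighbor, w in sorted(graph[node].items(), reverse=True):
--             stack.append((neighbor, path + [neighbor], cost + w))
--     return None
-- ===== SOURCE B (Python) =====
-- graph = {
--     "A": {"B": 1, "C": 1},
--     "B": {"A": 1, "D": 1},
--     "C": {"A": 1, "K": 1},
--     "D": {"B": 1, "M": 1},
--     "E": {"N": 1},
--     "G": {"I": 1, "P": 1},
--     "I": {"G": 1, "Q": 1, "W": 1},
--     "W": {"I": 30, "K": 30},
--     "K": {"W": 1, "M": 1, "T": 1, "C": 1},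
--     "M": {"K": 1, "N": 1, "F": 1, "D": 1},
--     "N": {"M": 1, "E": 1},
--     "P": {"G": 1, "Q": 1},
--     "Q": {"I": 1, "P": 1, "R": 1},
--     "R": {"Q": 1, "T": 1},
--     "T": {"K": 1, "R": 1},
--     "F": {"M": 1},
-- }
--
-- def dfs(start, goal):
--     """Recursive DFS: first-found path and its cost, neighbors in ascending order."""
--     visited = set()
--
--     def explore(node, path, cost):
--         if node == goal:
--             return path, cost
--         if node in visited:
--             return None
--         visited.add(node)
--         for neighbor, w in sorted(graph[node].items()):
--             found = explore(neighbor, path + [neighbor], cost + w)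
--             if found is not None:
--                 return found
--         return None
--
--     return explore(start, [start], 0)
-- ===== Notes on version B (the rewrite author's own statement) =====
-- stated objective: alternative
-- what changed: Replaces A's explicit-stack while-loop (pushing neighbors in descending order and popping) with a recursive explore helper over a shared visited set that tries ascending-sorted neighbors and returns the first non-None result.
import Mathlib
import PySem

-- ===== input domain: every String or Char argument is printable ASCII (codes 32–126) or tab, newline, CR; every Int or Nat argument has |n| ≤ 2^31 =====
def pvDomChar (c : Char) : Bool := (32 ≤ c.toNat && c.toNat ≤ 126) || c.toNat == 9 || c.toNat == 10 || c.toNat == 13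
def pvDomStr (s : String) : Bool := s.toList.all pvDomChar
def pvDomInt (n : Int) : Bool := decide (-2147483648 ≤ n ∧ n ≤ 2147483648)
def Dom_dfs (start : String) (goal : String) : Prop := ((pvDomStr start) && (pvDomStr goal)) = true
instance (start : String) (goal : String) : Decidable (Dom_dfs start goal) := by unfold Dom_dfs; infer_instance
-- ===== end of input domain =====

-- B re-implements the same fixed-graph DFS as a recursive explorer (goal check, visited check,
-- then first non-None result over ascending-sorted neighbors) instead of A's explicit stack loop;
-- objective: alternative decomposition, same cost. Both ports use a fuel guard for totality only.


-- the module-level constant `graph`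
def pyGraph : PySem.Dict String (PySem.Dict String Int) := PySem.Dict.ofList
  [ ("A", PySem.Dict.ofList [("B", 1), ("C", 1)])
  , ("B", PySem.Dict.ofList [("A", 1), ("D", 1)])
  , ("C", PySem.Dict.ofList [("A", 1), ("K", 1)])
  , ("D", PySem.Dict.ofList [("B", 1), ("M", 1)])
  , ("E", PySem.Dict.ofList [("N", 1)])
  , ("G", PySem.Dict.ofList [("I", 1), ("P", 1)])
  , ("I", PySem.Dict.ofList [("G", 1), ("Q", 1), ("W", 1)])
  , ("W", PySem.Dict.ofList [("I", 30), ("K", 30)])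
  , ("K", PySem.Dict.ofList [("W", 1), ("M", 1), ("T", 1), ("C", 1)])
  , ("M", PySem.Dict.ofList [("K", 1), ("N", 1), ("F", 1), ("D", 1)])
  , ("N", PySem.Dict.ofList [("M", 1), ("E", 1)])
  , ("P", PySem.Dict.ofList [("G", 1), ("Q", 1)])
  , ("Q", PySem.Dict.ofList [("I", 1), ("P", 1), ("R", 1)])
  , ("R", PySem.Dict.ofList [("Q", 1), ("T", 1)])
  , ("T", PySem.Dict.ofList [("K", 1), ("R", 1)])
  , ("F", PySem.Dict.ofList [("M", 1)]) ]

-- ===== PORT A =====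
-- A's while-loop over the stack (top of stack = head of the list; Python's append/pop work at the
-- list end, which this cons/head representation models exactly).  The Nat fuel only makes the loop
-- total in Lean: a run pops at most 1 + (sum of all degrees) = 37 elements, so fuel 100 is never
-- exhausted; on `graph[node]` KeyError (get? = none, outside Pre_dfs) the port returns none.
def dfsLoopA (goal : String) : Nat → List (String × List String × Int) → PySem.Set String →
    Option (List String × Int)
  | 0, _, _ => none
  | _ + 1, [], _ => none
  | fu + 1, (node, path, cost) :: rest, visited =>
    if node == goal then some (path, cost)
    else if PySem.Set.contains visited node then dfsLoopA goal fu rest visited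
    else
      match pyGraph.get? node with
      | none => none  -- Python raises KeyError here; excluded by Pre_dfs
      | some nbrs =>
        dfsLoopA goal fu
          ((PySem.List.sorted2 nbrs.items (fun p => p.1.toList) Prod.snd true).foldl
            (fun st p => (p.1, path ++ [p.1], cost + p.2) :: st) rest)
          (PySem.Set.add visited node)

def dfs (start : String) (goal : String) : Option (List String × Int) :=
  dfsLoopA goal 100 [(start, [start], 0)] PySem.Set.empty

-- ===== PORT B =====
-- B's recursive `explore` (the shared mutable `visited` is threaded in and returned); `goNbrs` is
-- the for-loop over the ascending-sorted neighbors returning the first non-None result.  The fuel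
-- is a totality guard only (call chains consume at most ~85 units here; 200 is never exhausted).
mutual
def exploreB (goal : String) : Nat → String → List String → Int → PySem.Set String →
    Option (List String × Int) × PySem.Set String
  | 0, _, _, _, visited => (none, visited)
  | fu + 1, node, path, cost, visited =>
    if node == goal then (some (path, cost), visited)
    else if PySem.Set.contains visited node then (none, visited)
    else
      match pyGraph.get? node with
      | none => (none, visited)  -- Python raises KeyError here; excluded by Pre_dfs
      | some nbrs =>
        goNbrs goal fu path cost (PySem.List.sorted2 nbrs.items (fun p => p.1.toList) Prod.snd false)
          (PySem.Set.add visited node)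

def goNbrs (goal : String) : Nat → List String → Int → List (String × Int) → PySem.Set String →
    Option (List String × Int) × PySem.Set String
  | 0, _, _, _, visited => (none, visited)
  | _ + 1, _, _, [], visited => (none, visited)
  | fu + 1, path, cost, (nb, w) :: rest, visited =>
    match exploreB goal fu nb (path ++ [nb]) (cost + w) visited with
    | (some found, visited') => (some found, visited')
    | (none, visited') => goNbrs goal fu path cost rest visited'
end

def dfs_alt (start : String) (goal : String) : Option (List String × Int) :=
  (exploreB goal 200 start [start] 0 PySem.Set.empty).1

-- ===== PRECONDITION & SPEC =====
def keysList : List String :=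
  ["A", "B", "C", "D", "E", "G", "I", "W", "K", "M", "N", "P", "Q", "R", "T", "F"]

-- A raises KeyError (graph[start]) exactly when start is not a key of graph and start ≠ goal
-- (neighbors are closed under the key set, so no other lookup can fail); Pre_ excludes only that.
def Pre_dfs (start : String) (goal : String) : Prop := start = goal ∨ start ∈ keysList
instance (start : String) (goal : String) : Decidable (Pre_dfs start goal) := by
  unfold Pre_dfs; infer_instance

def pvWitness_dfs : String × String := ("A", "N")

def Spec_dfs (start : String) (goal : String) (out : Option (List String × Int)) : Prop :=
  out = dfs_alt start goal
instance (start : String) (goal : String) (out : Option (List String × Int)) :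
    Decidable (Spec_dfs start goal out) := by unfold Spec_dfs; infer_instance

-- ===== CLAIM (what is proved, stated in full; the proofs are below) =====
def Claim_equal_dfs : Prop := ∀ (start : String) (goal : String),
  Dom_dfs start goal → Pre_dfs start goal → Spec_dfs start goal (dfs start goal)

-- ===== LEMMAS AND PROOFS =====

-- neighbor keys of every graph key are again graph keys
lemma nbrs_closed : ∀ node ∈ keysList,
    (((pyGraph.get? node).getD PySem.Dict.empty).items.all
      (fun p => decide (p.1 ∈ keysList))) = true := by decide

-- both sides agree on all pairs of graph keys (finite check)
lemma pairs_eq : ∀ s ∈ keysList, ∀ g ∈ keysList, dfs s g = dfs_alt s g := by decide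

lemma foldl_cons_eq {α β : Type} (l : List α) (init : List β) (f : α → β) :
    l.foldl (fun st x => f x :: st) init = (l.map f).reverse ++ init := by
  induction l generalizing init with
  | nil => rfl
  | cons a t ih => simp [List.foldl_cons, ih]

lemma loopA_none (goal : String) (hg : goal ∉ keysList) :
    ∀ (fu : Nat) (stack : List (String × List String × Int)) (visited : PySem.Set String),
      (∀ t ∈ stack, t.1 ∈ keysList) → dfsLoopA goal fu stack visited = none := by
  intro fu
  induction fu with
  | zero => intro stack visited _; rfl
  | succ fu ih =>
    rintro (_ | ⟨⟨node, path, cost⟩, rest⟩) visited hstack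
    · rfl
    · have hnode : node ∈ keysList := hstack (node, path, cost) List.mem_cons_self
      have hne : (node == goal) = false := by
        simp only [beq_eq_false_iff_ne]; rintro rfl; exact hg hnode
      have hrest : ∀ t ∈ rest, t.1 ∈ keysList := fun t ht => hstack t (List.mem_cons_of_mem _ ht)
      simp only [dfsLoopA, hne, Bool.false_eq_true, if_false]
      by_cases hv : PySem.Set.contains visited node = true
      · simp only [hv, if_true]; exact ih rest visited hrest
      · simp only [hv, Bool.false_eq_true, if_false]
        cases hget : pyGraph.get? node with
        | none => rfl
        | some nbrs =>
          apply ih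
          intro t ht
          rw [foldl_cons_eq] at ht
          rcases List.mem_append.mp ht with hl | hr
          · rcases List.mem_map.mp (List.mem_reverse.mp hl) with ⟨p, hp, rfl⟩
            have hp' : p ∈ nbrs.items := (PySem.List.sorted2_perm _ _ _ _).mem_iff.mp hp
            have := nbrs_closed node hnode
            rw [hget] at this
            simpa using (List.all_eq_true.mp this) p hp'
          · exact hrest t hr

lemma exploreB_none (goal : String) (hg : goal ∉ keysList) :
    ∀ (fu : Nat),
      (∀ node path cost visited, node ∈ keysList →
        (exploreB goal fu node path cost visited).1 = none) ∧
      (∀ path cost l visited, (∀ p ∈ l, p.1 ∈ keysList) →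
        (goNbrs goal fu path cost l visited).1 = none) := by
  intro fu
  induction fu with
  | zero => exact ⟨fun _ _ _ _ _ => rfl, fun _ _ _ _ _ => rfl⟩
  | succ fu ih =>
    constructor
    · intro node path cost visited hnode
      have hne : (node == goal) = false := by
        simp only [beq_eq_false_iff_ne]; rintro rfl; exact hg hnode
      simp only [exploreB, hne, Bool.false_eq_true, if_false]
      by_cases hv : PySem.Set.contains visited node = true
      · simp only [hv, if_true]
      · simp only [hv, Bool.false_eq_true, if_false]
        cases hget : pyGraph.get? node with
        | none => rfl
        | some nbrs =>
          apply ih.2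
          intro p hp
          have hp' : p ∈ nbrs.items := (PySem.List.sorted2_perm _ _ _ _).mem_iff.mp hp
          have := nbrs_closed node hnode
          rw [hget] at this
          simpa using (List.all_eq_true.mp this) p hp'
    · rintro path cost (_ | ⟨⟨nb, w⟩, rest⟩) visited hl
      · rfl
      · have hnb : nb ∈ keysList := hl (nb, w) List.mem_cons_self
        have h1 := ih.1 nb (path ++ [nb]) (cost + w) visited hnb
        simp only [goNbrs]
        cases hE : exploreB goal fu nb (path ++ [nb]) (cost + w) visited with
        | mk o v' =>
          rw [hE] at h1
          simp only at h1
          subst h1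
          exact ih.2 path cost rest v' (fun p hp => hl p (List.mem_cons_of_mem _ hp))

lemma dfs_self (s : String) : dfs s s = some ([s], 0) := by
  have h : (100 : Nat) = 99 + 1 := rfl
  rw [dfs, h]
  simp [dfsLoopA]

lemma dfs_alt_self (s : String) : dfs_alt s s = some ([s], 0) := by
  have h : (200 : Nat) = 199 + 1 := rfl
  rw [dfs_alt, h]
  simp [exploreB]

-- ===== VERDICT (by name: the statement is the Claim_ definition above) =====
theorem dfs_spec : Claim_equal_dfs := by
  intro start goal _ hpre
  unfold Spec_dfs
  by_cases hs : start = goal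
  · subst hs; rw [dfs_self, dfs_alt_self]
  · have hk : start ∈ keysList := by
      rcases hpre with h | h
      · exact absurd h hs
      · exact h
    by_cases hgk : goal ∈ keysList
    · exact pairs_eq start hk goal hgk
    · rw [dfs, dfs_alt,
        loopA_none goal hgk 100 _ _ (by rintro t ht; simp at ht; subst ht; exact hk),
        (exploreB_none goal hgk 200).1 start [start] 0 PySem.Set.empty hk]
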